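-- pv_equiv track=rewrite | github.com/ikokkari/PythonProblems | labs109.py | infected_cells
-- ===== SOURCE A (Python) =====
-- def infected_cells(infected):
--     stack, infected = infected, set(infected)
--     dirs = [(0, 1), (1, 0), (0, -1), (-1, 0)]
--     while len(stack) > 0:
--         (x, y) = stack.pop()
--         for (dx, dy) in dirs:
--             nx, ny = x + dx, y + dy
--             if (nx, ny) not in infected:
--                 neighbours = 0
--                 for (ddx, ddy) in dirs:
--                     if (nx + ddx, ny + ddy) in infected:
--                         neighbours += 1
--                 if neighbours > 1:
--                     stack.append((nx, ny))
--                     infected.add((nx, ny))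
--     return len(infected)
-- ===== SOURCE B (Python) =====
-- def infected_cells(infected):
--     # Drain the argument by popping (same emptying side effect as A), collecting the cells.
--     cells = set()
--     while infected:
--         cells.add(infected.pop())
--     deltas = ((0, 1), (1, 0), (0, -1), (-1, 0))
--     # Fixpoint sweep: repeatedly add every candidate with more than one infected
--     # orthogonal neighbour until a full sweep adds nothing.
--     while True:
--         frontier = {(x + dx, y + dy) for (x, y) in cells for (dx, dy) in deltas}
--         frontier = {c for c in frontier
--                     if c not in cells
--                     and sum((c[0] + dx, c[1] + dy) in cells for (dx, dy) in deltas) > 1}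
--         if not frontier:
--             return len(cells)
--         cells |= frontier
-- ===== Notes on version B (the rewrite author's own statement) =====
-- stated objective: alternative
-- what changed: A propagates the infection with a single LIFO worklist (pop a cell, examine its neighbours, push newly infected ones); B instead drains the input into a set and repeatedly sweeps the whole current set, computing the frontier of candidates with more than one infected orthogonal neighbour against a snapshot and adding it wholesale until a sweep adds nothing — both reach the same least fixpoint and return its size.
import Mathlib
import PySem

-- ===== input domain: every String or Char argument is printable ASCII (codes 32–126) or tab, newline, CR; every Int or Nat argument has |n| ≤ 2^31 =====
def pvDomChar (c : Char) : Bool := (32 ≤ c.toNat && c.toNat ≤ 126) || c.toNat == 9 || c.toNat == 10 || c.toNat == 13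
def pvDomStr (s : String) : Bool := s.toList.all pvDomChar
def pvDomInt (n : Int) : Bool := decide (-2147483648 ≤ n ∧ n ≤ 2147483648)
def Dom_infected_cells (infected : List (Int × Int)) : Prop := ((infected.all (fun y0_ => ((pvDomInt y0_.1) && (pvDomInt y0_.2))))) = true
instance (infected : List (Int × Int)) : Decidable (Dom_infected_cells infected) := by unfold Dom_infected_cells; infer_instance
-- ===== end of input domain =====

-- B replaces A's worklist-stack propagation by a fixpoint sweep over the whole set (alternative
-- decomposition, not claimed faster); both A and B empty the argument list in Python (same side
-- effect), the equivalence proved here is about the return value.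

-- ===== PORT A =====
-- upper bound on how many distinct cells can ever be infected inside the input domain
-- (|coordinates| ≤ 2^31, so at most (2^32+1)^2 cells): used only as loop fuel
def pvFuelN : Nat := 18446744082299486209

def pvDirs : List (Int × Int) := [(0, 1), (1, 0), (0, -1), (-1, 0)]

-- body of A's 'for (dx, dy) in dirs' loop: state = (stack, infected)
def pvStepA (x y : Int) (st : List (Int × Int) × PySem.Set (Int × Int)) (d : Int × Int) :
    List (Int × Int) × PySem.Set (Int × Int) :=
  let nx := x + d.1
  let ny := y + d.2
  if (nx, ny) ∈ st.2 then st
  else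
    let neighbours : Nat :=
      pvDirs.foldl (fun n dd => if (nx + dd.1, ny + dd.2) ∈ st.2 then n + 1 else n) 0
    if 1 < neighbours then (st.1 ++ [(nx, ny)], PySem.Set.add st.2 (nx, ny)) else st

-- A's 'while len(stack) > 0' loop; stack.pop() takes the LAST element
def pvLoopA : Nat → List (Int × Int) → PySem.Set (Int × Int) → PySem.Set (Int × Int)
  | 0, _, inf => inf
  | f + 1, stack, inf =>
    match stack.getLast? with
    | none => inf
    | some (x, y) =>
      let st := pvDirs.foldl (pvStepA x y) (stack.dropLast, inf)
      pvLoopA f st.1 st.2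

def infected_cells (infected : List (Int × Int)) : Int :=
  ((pvLoopA (infected.length + pvFuelN + 1) infected (PySem.Set.ofList infected)).length : Int)

-- ===== PORT B =====
def pvDeltas : List (Int × Int) := [(0, 1), (1, 0), (0, -1), (-1, 0)]

-- the two set comprehensions of one sweep: candidate neighbours, then those with > 1 infected neighbour
def pvFrontier (cells : PySem.Set (Int × Int)) : PySem.Set (Int × Int) :=
  let cand : PySem.Set (Int × Int) :=
    PySem.Set.ofList (cells.flatMap (fun c => pvDeltas.map (fun d => (c.1 + d.1, c.2 + d.2))))
  PySem.Set.ofList (cand.filter (fun c =>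
    !(PySem.Set.contains cells c) &&
      decide (1 < pvDeltas.countP (fun d => decide ((c.1 + d.1, c.2 + d.2) ∈ cells)))))

-- B's 'while True' sweep loop
def pvLoopB : Nat → PySem.Set (Int × Int) → PySem.Set (Int × Int)
  | 0, cells => cells
  | f + 1, cells =>
    let frontier := pvFrontier cells
    if frontier.isEmpty then cells else pvLoopB f (PySem.Set.union cells frontier)

def infected_cells_alt (infected : List (Int × Int)) : Int :=
  -- draining 'while infected: cells.add(infected.pop())' pops from the END
  let cells : PySem.Set (Int × Int) := infected.reverse.foldl PySem.Set.add PySem.Set.empty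
  ((pvLoopB (pvFuelN + 1) cells).length : Int)

-- ===== PRECONDITION & SPEC =====
def Spec_infected_cells (infected : List (Int × Int)) (out : Int) : Prop := out = infected_cells_alt infected
instance (infected : List (Int × Int)) (out : Int) : Decidable (Spec_infected_cells infected out) := by unfold Spec_infected_cells; infer_instance

-- ===== CLAIM (what is proved, stated in full; the proofs are below) =====
def Claim_equal_infected_cells : Prop := ∀ (infected : List (Int × Int)), Dom_infected_cells infected → Spec_infected_cells infected (infected_cells infected)


-- ===== LEMMAS AND PROOFS =====

-- cells inside the coordinate box of the input domain
def pvInB (c : Int × Int) : Prop :=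
  -2147483648 ≤ c.1 ∧ c.1 ≤ 2147483648 ∧ -2147483648 ≤ c.2 ∧ c.2 ≤ 2147483648

noncomputable def pvBoxF : Finset (Int × Int) :=
  Finset.Icc (-2147483648 : Int) 2147483648 ×ˢ Finset.Icc (-2147483648 : Int) 2147483648

-- "c has two distinct infected orthogonal neighbours"
def pvTrig (S : Int × Int → Prop) (c : Int × Int) : Prop :=
  ∃ d1, d1 ∈ pvDirs ∧ ∃ d2, d2 ∈ pvDirs ∧ d1 ≠ d2 ∧
    S (c.1 + d1.1, c.2 + d1.2) ∧ S (c.1 + d2.1, c.2 + d2.2)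

-- the least fixpoint both programs compute: initial cells plus spreading
inductive pvReach (init : List (Int × Int)) : Int × Int → Prop
  | base (c : Int × Int) : c ∈ init → pvReach init c
  | step (c d1 d2 : Int × Int) : d1 ∈ pvDirs → d2 ∈ pvDirs → d1 ≠ d2 →
      pvReach init (c.1 + d1.1, c.2 + d1.2) → pvReach init (c.1 + d2.1, c.2 + d2.2) →
      pvReach init c

lemma pvReach_minimal {init : List (Int × Int)} {S : Int × Int → Prop}
    (h0 : ∀ c ∈ init, S c) (hcl : ∀ c, pvTrig S c → S c) :
    ∀ c, pvReach init c → S c := by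
  intro c h
  induction h with
  | base c hc => exact h0 c hc
  | step c d1 d2 m1 m2 hne _ _ ih1 ih2 => exact hcl c ⟨d1, m1, d2, m2, hne, ih1, ih2⟩

lemma pv_boxF_card : pvBoxF.card = pvFuelN := by
  rw [pvBoxF, Finset.card_product, Int.card_Icc]
  have h : ((2147483648 + 1 - -2147483648 : Int)).toNat = 4294967297 := rfl
  rw [h, pvFuelN]

lemma pv_mem_boxF {c : Int × Int} : c ∈ pvBoxF ↔ pvInB c := by
  cases c with | mk a b => simp [pvBoxF, Finset.mem_Icc, pvInB, and_assoc]

lemma pv_len_le {l : List (Int × Int)} (h : l.Nodup) (hb : ∀ c ∈ l, pvInB c) :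
    l.length ≤ pvFuelN := by
  have hsub : l.toFinset ⊆ pvBoxF := by
    intro c hc
    have h1 : pvInB c := hb c (List.mem_toFinset.1 hc)
    rw [pv_mem_boxF]
    exact h1
  calc l.length = l.toFinset.card := (List.toFinset_card_of_nodup h).symm
    _ ≤ pvBoxF.card := Finset.card_le_card hsub
    _ = pvFuelN := pv_boxF_card

lemma pv_len_lt {l l' : List (Int × Int)} (hl : l.Nodup) (h' : l'.Nodup)
    (hsub : ∀ c ∈ l, c ∈ l') {x : Int × Int} (hx : x ∈ l') (hnx : x ∉ l) :
    l.length < l'.length := by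
  have h1 : l.toFinset ⊂ l'.toFinset := by
    constructor
    · exact fun c hc => List.mem_toFinset.2 (hsub c (List.mem_toFinset.1 hc))
    · intro hcon
      exact hnx (List.mem_toFinset.1 (hcon (List.mem_toFinset.2 hx)))
  calc l.length = l.toFinset.card := (List.toFinset_card_of_nodup hl).symm
    _ < l'.toFinset.card := Finset.card_lt_card h1
    _ = l'.length := List.toFinset_card_of_nodup h'

lemma pv_neg_mem {d : Int × Int} (h : d ∈ pvDirs) : (-d.1, -d.2) ∈ pvDirs := by
  simp [pvDirs] at h ⊢
  rcases h with h | h | h | h <;> subst h <;> norm_num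

lemma pv_trig_inB {S : List (Int × Int)} {c : Int × Int} (hS : ∀ x ∈ S, pvInB x)
    (h : pvTrig (· ∈ S) c) : pvInB c := by
  obtain ⟨d1, hd1, d2, hd2, hne, t1, t2⟩ := h
  have h1 := hS _ t1
  have h2 := hS _ t2
  simp [pvDirs] at hd1 hd2
  rcases hd1 with h | h | h | h <;> rcases hd2 with g | g | g | g <;> subst h <;> subst g <;>
    simp_all [pvInB] <;> omega

lemma pv_countA_iff (S : List (Int × Int)) (nx ny : Int) :
    (1 < pvDirs.foldl (fun n dd => if (nx + dd.1, ny + dd.2) ∈ S then n + 1 else n) 0) ↔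
      pvTrig (· ∈ S) (nx, ny) := by
  simp only [pvDirs, List.foldl, pvTrig]
  by_cases h1 : (nx + (0:Int), ny + (1:Int)) ∈ S <;>
  by_cases h2 : (nx + (1:Int), ny + (0:Int)) ∈ S <;>
  by_cases h3 : (nx + (0:Int), ny + (-1:Int)) ∈ S <;>
  by_cases h4 : (nx + (-1:Int), ny + (0:Int)) ∈ S <;>
  simp_all [Prod.ext_iff] <;>
  first
  | exact ⟨0, 1, by norm_num, 1, 0, by norm_num, by norm_num, by simpa using h1, by simpa using h2⟩
  | exact ⟨0, 1, by norm_num, 0, -1, by norm_num, by norm_num, by simpa using h1, by simpa using h3⟩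
  | exact ⟨0, 1, by norm_num, -1, 0, by norm_num, by norm_num, by simpa using h1, by simpa using h4⟩
  | exact ⟨1, 0, by norm_num, 0, -1, by norm_num, by norm_num, by simpa using h2, by simpa using h3⟩
  | exact ⟨1, 0, by norm_num, -1, 0, by norm_num, by norm_num, by simpa using h2, by simpa using h4⟩
  | exact ⟨0, -1, by norm_num, -1, 0, by norm_num, by norm_num, by simpa using h3, by simpa using h4⟩
  | (intro a b hab a2 b2 hab2 hne hm
     rcases hab with ⟨rfl,rfl⟩|⟨rfl,rfl⟩|⟨rfl,rfl⟩|⟨rfl,rfl⟩ <;>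
     rcases hab2 with ⟨rfl,rfl⟩|⟨rfl,rfl⟩|⟨rfl,rfl⟩|⟨rfl,rfl⟩ <;> simp_all)

lemma pv_countB_iff (S : List (Int × Int)) (x : Int × Int) :
    (1 < pvDeltas.countP (fun d => decide ((x.1 + d.1, x.2 + d.2) ∈ S))) ↔
      pvTrig (· ∈ S) x := by
  simp only [pvDeltas, pvTrig, pvDirs, List.countP, List.countP.go]
  by_cases h1 : (x.1 + (0:Int), x.2 + (1:Int)) ∈ S <;>
  by_cases h2 : (x.1 + (1:Int), x.2 + (0:Int)) ∈ S <;>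
  by_cases h3 : (x.1 + (0:Int), x.2 + (-1:Int)) ∈ S <;>
  by_cases h4 : (x.1 + (-1:Int), x.2 + (0:Int)) ∈ S <;>
  simp_all [Prod.ext_iff] <;>
  first
  | exact ⟨0, 1, by norm_num, 1, 0, by norm_num, by norm_num, by simpa using h1, by simpa using h2⟩
  | exact ⟨0, 1, by norm_num, 0, -1, by norm_num, by norm_num, by simpa using h1, by simpa using h3⟩
  | exact ⟨0, 1, by norm_num, -1, 0, by norm_num, by norm_num, by simpa using h1, by simpa using h4⟩
  | exact ⟨1, 0, by norm_num, 0, -1, by norm_num, by norm_num, by simpa using h2, by simpa using h3⟩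
  | exact ⟨1, 0, by norm_num, -1, 0, by norm_num, by norm_num, by simpa using h2, by simpa using h4⟩
  | exact ⟨0, -1, by norm_num, -1, 0, by norm_num, by norm_num, by simpa using h3, by simpa using h4⟩
  | (intro a b hab a2 b2 hab2 hne hm
     rcases hab with ⟨rfl,rfl⟩|⟨rfl,rfl⟩|⟨rfl,rfl⟩|⟨rfl,rfl⟩ <;>
     rcases hab2 with ⟨rfl,rfl⟩|⟨rfl,rfl⟩|⟨rfl,rfl⟩|⟨rfl,rfl⟩ <;> simp_all)

-- invariant of A's outer loop
def pvInv (init stack inf : List (Int × Int)) : Prop :=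
  inf.Nodup ∧ (∀ c ∈ stack, c ∈ inf) ∧ (∀ c ∈ init, c ∈ inf) ∧
    (∀ c ∈ inf, pvReach init c) ∧ (∀ c ∈ inf, pvInB c)

-- every triggered uninfected cell has an infected neighbour still on the stack
def pvK (stack inf : List (Int × Int)) : Prop :=
  ∀ c, c ∉ inf → pvTrig (· ∈ inf) c → ∃ d ∈ pvDirs, (c.1 + d.1, c.2 + d.2) ∈ stack

def pvJ (x y : Int) (ds stack inf : List (Int × Int)) : Prop :=
  ∀ c, c ∉ inf → pvTrig (· ∈ inf) c →
    (∃ d ∈ pvDirs, (c.1 + d.1, c.2 + d.2) ∈ stack) ∨ ∃ d ∈ ds, c = (x + d.1, y + d.2)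

lemma pv_foldA (init : List (Int × Int)) (x y : Int) :
    ∀ (ds stack inf : List (Int × Int)),
    pvInv init stack inf → pvJ x y ds stack inf →
    pvInv init (ds.foldl (pvStepA x y) (stack, inf)).1 (ds.foldl (pvStepA x y) (stack, inf)).2 ∧
    pvK (ds.foldl (pvStepA x y) (stack, inf)).1 (ds.foldl (pvStepA x y) (stack, inf)).2 ∧
    (ds.foldl (pvStepA x y) (stack, inf)).1.length + inf.length
      = stack.length + (ds.foldl (pvStepA x y) (stack, inf)).2.length ∧
    inf.length ≤ (ds.foldl (pvStepA x y) (stack, inf)).2.length := by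
  intro ds
  induction ds with
  | nil =>
    intro stack inf hinv hJ
    refine ⟨hinv, ?_, by simp, le_refl _⟩
    intro c hc ht
    rcases hJ c hc ht with h | ⟨d, hd, _⟩
    · exact h
    · simp at hd
  | cons d ds ih =>
    intro stack inf hinv hJ
    obtain ⟨hnd, hstk, hin, hrch, hbox⟩ := hinv
    rw [List.foldl_cons]
    by_cases hmem : (x + d.1, y + d.2) ∈ inf
    · have hstep : pvStepA x y (stack, inf) d = (stack, inf) := by
        simp [pvStepA, hmem]
      rw [hstep]
      refine ih stack inf ⟨hnd, hstk, hin, hrch, hbox⟩ ?_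
      intro c hc ht
      rcases hJ c hc ht with h | ⟨d', hd', hceq⟩
      · exact Or.inl h
      · rcases List.mem_cons.1 hd' with rfl | hd'
        · exact (hc (by rw [hceq]; exact hmem)).elim
        · exact Or.inr ⟨d', hd', hceq⟩
    · by_cases hcnt : 1 < pvDirs.foldl
          (fun n dd => if (x + d.1 + dd.1, y + d.2 + dd.2) ∈ inf then n + 1 else n) 0
      · -- the cell (x+d.1, y+d.2) is added and pushed
        have htrig : pvTrig (· ∈ inf) (x + d.1, y + d.2) :=
          (pv_countA_iff inf (x + d.1) (y + d.2)).1 hcnt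
        have hstep : pvStepA x y (stack, inf) d
            = (stack ++ [(x + d.1, y + d.2)], inf ++ [(x + d.1, y + d.2)]) := by
          simp [pvStepA, hmem, hcnt]
        rw [hstep]
        have hnd' : (inf ++ [(x + d.1, y + d.2)]).Nodup := by
          rw [List.nodup_append]
          refine ⟨hnd, List.nodup_singleton _, fun a ha b hb => ?_⟩
          simp only [List.mem_singleton] at hb
          subst hb
          exact fun heq => hmem (heq ▸ ha)
        have hinv' : pvInv init (stack ++ [(x + d.1, y + d.2)]) (inf ++ [(x + d.1, y + d.2)]) := by
          refine ⟨hnd', ?_, ?_, ?_, ?_⟩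
          · intro c hc
            rcases List.mem_append.1 hc with h | h
            · exact List.mem_append_left _ (hstk c h)
            · exact List.mem_append_right _ h
          · exact fun c hc => List.mem_append_left _ (hin c hc)
          · intro c hc
            rcases List.mem_append.1 hc with h | h
            · exact hrch c h
            · simp at h
              subst h
              obtain ⟨d1, hd1, d2, hd2, hne2, t1, t2⟩ := htrig
              exact pvReach.step _ d1 d2 hd1 hd2 hne2 (hrch _ t1) (hrch _ t2)
          · intro c hc
            rcases List.mem_append.1 hc with h | h
            · exact hbox c h
            · simp at h
              subst h
              exact pv_trig_inB hbox htrig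
        have hJ' : pvJ x y ds (stack ++ [(x + d.1, y + d.2)]) (inf ++ [(x + d.1, y + d.2)]) := by
          intro c hc ht
          have hcinf : c ∉ inf := fun h => hc (List.mem_append_left _ h)
          obtain ⟨d1, hd1, d2, hd2, hne2, t1, t2⟩ := ht
          by_cases e1 : ((c.1 + d1.1, c.2 + d1.2) : Int × Int) = (x + d.1, y + d.2)
          · exact Or.inl ⟨d1, hd1, by rw [e1]; simp⟩
          by_cases e2 : ((c.1 + d2.1, c.2 + d2.2) : Int × Int) = (x + d.1, y + d.2)
          · exact Or.inl ⟨d2, hd2, by rw [e2]; simp⟩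
          have t1' : (c.1 + d1.1, c.2 + d1.2) ∈ inf := by
            rcases List.mem_append.1 t1 with h | h
            · exact h
            · simp at h
              exact absurd (Prod.ext h.1 h.2) e1
          have t2' : (c.1 + d2.1, c.2 + d2.2) ∈ inf := by
            rcases List.mem_append.1 t2 with h | h
            · exact h
            · simp at h
              exact absurd (Prod.ext h.1 h.2) e2
          rcases hJ c hcinf ⟨d1, hd1, d2, hd2, hne2, t1', t2'⟩ with ⟨d', hd', hmem'⟩ | ⟨d', hd', hceq⟩
          · exact Or.inl ⟨d', hd', List.mem_append_left _ hmem'⟩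
          · rcases List.mem_cons.1 hd' with rfl | hd'
            · exact (hc (by rw [hceq]; simp)).elim
            · exact Or.inr ⟨d', hd', hceq⟩
        obtain ⟨inv', K', heq, hle⟩ := ih _ _ hinv' hJ'
        refine ⟨inv', K', ?_, ?_⟩
        · simp only [List.length_append, List.length_singleton] at heq ⊢
          omega
        · simp only [List.length_append, List.length_singleton] at hle ⊢
          omega
      · have hstep : pvStepA x y (stack, inf) d = (stack, inf) := by
          simp [pvStepA, hmem, hcnt]
        rw [hstep]
        refine ih stack inf ⟨hnd, hstk, hin, hrch, hbox⟩ ?_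
        intro c hc ht
        rcases hJ c hc ht with h | ⟨d', hd', hceq⟩
        · exact Or.inl h
        · rcases List.mem_cons.1 hd' with rfl | hd'
          · subst hceq
            exact absurd ((pv_countA_iff inf _ _).2 ht) hcnt
          · exact Or.inr ⟨d', hd', hceq⟩

lemma pv_loopA (init : List (Int × Int)) :
    ∀ (fuel : Nat) (stack inf : List (Int × Int)), pvInv init stack inf → pvK stack inf →
    stack.length + (pvFuelN - inf.length) < fuel →
    (pvLoopA fuel stack inf).Nodup ∧ ∀ c, c ∈ pvLoopA fuel stack inf ↔ pvReach init c := by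
  intro fuel
  induction fuel with
  | zero => intro stack inf _ _ h; omega
  | succ f ih =>
    intro stack inf hinv hK hfuel
    obtain ⟨hnd, hstk, hin, hrch, hbox⟩ := hinv
    rcases hlast : stack.getLast? with _ | ⟨x, y⟩
    · have hnil : stack = [] := List.getLast?_eq_none_iff.1 hlast
      have hres : pvLoopA (f + 1) stack inf = inf := by simp [pvLoopA, hlast]
      rw [hres]
      refine ⟨hnd, fun c => ⟨fun hc => hrch c hc, fun hr => ?_⟩⟩
      have hcl : ∀ c, pvTrig (· ∈ inf) c → c ∈ inf := by
        intro c ht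
        by_contra hc
        obtain ⟨d', hd', hmem'⟩ := hK c hc ht
        rw [hnil] at hmem'
        simp at hmem'
      exact pvReach_minimal hin hcl c hr
    · obtain ⟨l', rfl⟩ : ∃ l', stack = l' ++ [(x, y)] := by
        obtain ⟨l', hl'⟩ := List.getLast?_eq_some_iff.1 hlast
        exact ⟨l', hl'⟩
      have hJ : pvJ x y pvDirs l' inf := by
        intro c hc ht
        obtain ⟨d', hd', hmem'⟩ := hK c hc ht
        rcases List.mem_append.1 hmem' with h | h
        · exact Or.inl ⟨d', hd', h⟩
        · simp only [List.mem_singleton, Prod.ext_iff] at h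
          refine Or.inr ⟨(-d'.1, -d'.2), pv_neg_mem hd', ?_⟩
          have hc1 : c.1 + d'.1 = x := h.1
          have hc2 : c.2 + d'.2 = y := h.2
          have : c = (c.1, c.2) := rfl
          rw [this, Prod.mk.injEq]
          constructor <;> omega
      obtain ⟨inv', K', heq, hlen⟩ := pv_foldA init x y pvDirs l' inf
        ⟨hnd, fun c hc => hstk c (List.mem_append_left _ hc), hin, hrch, hbox⟩ hJ
      have hres : pvLoopA (f + 1) (l' ++ [(x, y)]) inf
          = pvLoopA f (pvDirs.foldl (pvStepA x y) (l', inf)).1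
              (pvDirs.foldl (pvStepA x y) (l', inf)).2 := by
        have hl : (l' ++ [(x, y)]).getLast? = some (x, y) := hlast
        simp [pvLoopA, hl]
      rw [hres]
      have hN2 : (pvDirs.foldl (pvStepA x y) (l', inf)).2.length ≤ pvFuelN :=
        pv_len_le inv'.1 inv'.2.2.2.2
      refine ih _ _ inv' K' ?_
      simp only [List.length_append, List.length_singleton] at hfuel
      omega

-- invariant of B's sweep loop
def pvInvB (init cells : List (Int × Int)) : Prop :=
  cells.Nodup ∧ (∀ c ∈ init, c ∈ cells) ∧ (∀ c ∈ cells, pvReach init c) ∧ (∀ c ∈ cells, pvInB c)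

lemma pv_mem_frontier (cells : PySem.Set (Int × Int)) (x : Int × Int) :
    x ∈ pvFrontier cells ↔
      (∃ c ∈ cells, ∃ d ∈ pvDeltas, x = (c.1 + d.1, c.2 + d.2)) ∧ x ∉ cells ∧
        1 < pvDeltas.countP (fun d => decide ((x.1 + d.1, x.2 + d.2) ∈ cells)) := by
  rw [pvFrontier]
  simp only [PySem.Set.mem_ofList, List.mem_filter, List.mem_flatMap, List.mem_map,
    Bool.and_eq_true, Bool.not_eq_true', decide_eq_true_eq]
  constructor
  · rintro ⟨⟨a, ha, d, hd, hx⟩, hcf, hcnt⟩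
    refine ⟨⟨a, ha, d, hd, hx.symm⟩, ?_, hcnt⟩
    intro hm
    have h2 := (PySem.Set.contains_iff _ _).2 hm
    rw [hcf] at h2
    simp at h2
  · rintro ⟨⟨a, ha, d, hd, hx⟩, hnm, hcnt⟩
    refine ⟨⟨a, ha, d, hd, hx.symm⟩, ?_, hcnt⟩
    rcases h : PySem.Set.contains cells x with _ | _
    · rfl
    · exact absurd ((PySem.Set.contains_iff _ _).1 h) hnm

lemma pv_loopB (init : List (Int × Int)) :
    ∀ (fuel : Nat) (cells : List (Int × Int)), pvInvB init cells →
    pvFuelN - cells.length < fuel →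
    (pvLoopB fuel cells).Nodup ∧ ∀ c, c ∈ pvLoopB fuel cells ↔ pvReach init c := by
  intro fuel
  induction fuel with
  | zero => intro cells _ h; omega
  | succ f ih =>
    intro cells hinv hfuel
    obtain ⟨hnd, hin, hrch, hbox⟩ := hinv
    by_cases hemp : (pvFrontier cells).isEmpty
    · have hres : pvLoopB (f + 1) cells = cells := by simp [pvLoopB, hemp]
      rw [hres]
      have hfe : pvFrontier cells = [] := List.isEmpty_iff.1 hemp
      refine ⟨hnd, fun c => ⟨fun hc => hrch c hc, fun hr => ?_⟩⟩
      have hcl : ∀ c, pvTrig (· ∈ cells) c → c ∈ cells := by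
        intro c ht
        by_contra hc
        obtain ⟨d1, hd1, d2, hd2, hne2, t1, t2⟩ := ht
        have hmf : c ∈ pvFrontier cells := by
          rw [pv_mem_frontier]
          refine ⟨⟨(c.1 + d1.1, c.2 + d1.2), t1, (-d1.1, -d1.2), ?_, ?_⟩, hc, ?_⟩
          · exact pv_neg_mem hd1
          · have : c = (c.1, c.2) := rfl
            rw [this, Prod.mk.injEq]
            constructor <;> ring
          · exact (pv_countB_iff cells c).2 ⟨d1, hd1, d2, hd2, hne2, t1, t2⟩
        rw [hfe] at hmf
        simp at hmf
      exact pvReach_minimal hin hcl c hr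
    · have hres : pvLoopB (f + 1) cells
          = pvLoopB f (PySem.Set.union cells (pvFrontier cells)) := by
        simp [pvLoopB, hemp]
      rw [hres]
      have hnd' : (PySem.Set.union cells (pvFrontier cells)).Nodup := PySem.Set.nodup_union _ _ hnd
      have hmemu : ∀ c, c ∈ PySem.Set.union cells (pvFrontier cells) ↔
          c ∈ cells ∨ c ∈ pvFrontier cells := fun c => PySem.Set.mem_union _ _ c
      have htrigf : ∀ c ∈ pvFrontier cells, pvTrig (· ∈ cells) c := by
        intro c hc
        exact (pv_countB_iff cells c).1 ((pv_mem_frontier cells c).1 hc).2.2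
      have hinv' : pvInvB init (PySem.Set.union cells (pvFrontier cells)) := by
        refine ⟨hnd', ?_, ?_, ?_⟩
        · exact fun c hc => (hmemu c).2 (Or.inl (hin c hc))
        · intro c hc
          rcases (hmemu c).1 hc with h | h
          · exact hrch c h
          · obtain ⟨d1, hd1, d2, hd2, hne2, t1, t2⟩ := htrigf c h
            exact pvReach.step _ d1 d2 hd1 hd2 hne2 (hrch _ t1) (hrch _ t2)
        · intro c hc
          rcases (hmemu c).1 hc with h | h
          · exact hbox c h
          · exact pv_trig_inB hbox (htrigf c h)
      refine ih _ hinv' ?_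
      have hne : pvFrontier cells ≠ [] := fun h => hemp (by simp [h])
      obtain ⟨h0, hh0⟩ := List.exists_mem_of_ne_nil _ hne
      have hnot : h0 ∉ cells := ((pv_mem_frontier cells h0).1 hh0).2.1
      have hlt : cells.length < (PySem.Set.union cells (pvFrontier cells)).length :=
        pv_len_lt hnd hnd' (fun c hc => (hmemu c).2 (Or.inl hc)) ((hmemu h0).2 (Or.inr hh0)) hnot
      have hN : (PySem.Set.union cells (pvFrontier cells)).length ≤ pvFuelN :=
        pv_len_le hnd' hinv'.2.2.2
      omega

-- ===== VERDICT (by name: the statement is the Claim_ definition above) =====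
theorem infected_cells_spec : Claim_equal_infected_cells := by
  intro infected hdom
  unfold Spec_infected_cells infected_cells infected_cells_alt
  have hB : ∀ c ∈ infected, pvInB c := by
    intro c hc
    have h := (List.all_eq_true.mp hdom) c hc
    simp only [pvDomInt, Bool.and_eq_true, decide_eq_true_eq] at h
    exact ⟨h.1.1, h.1.2, h.2.1, h.2.2⟩
  have invA : pvInv infected infected (PySem.Set.ofList infected) := by
    refine ⟨PySem.Set.nodup_ofList _, ?_, ?_, ?_, ?_⟩
    · exact fun c hc => (PySem.Set.mem_ofList _ _).2 hc
    · exact fun c hc => (PySem.Set.mem_ofList _ _).2 hc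
    · exact fun c hc => pvReach.base c ((PySem.Set.mem_ofList _ _).1 hc)
    · exact fun c hc => hB c ((PySem.Set.mem_ofList _ _).1 hc)
  have kA : pvK infected (PySem.Set.ofList infected) := by
    intro c hc ht
    obtain ⟨d1, hd1, d2, hd2, hne2, t1, t2⟩ := ht
    exact ⟨d1, hd1, (PySem.Set.mem_ofList _ _).1 t1⟩
  have hA := pv_loopA infected (infected.length + pvFuelN + 1) infected
    (PySem.Set.ofList infected) invA kA (by
      have := Nat.sub_le pvFuelN (PySem.Set.ofList infected).length
      omega)
  have hcells : infected.reverse.foldl PySem.Set.add PySem.Set.empty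
      = PySem.Set.ofList infected.reverse := (PySem.Set.ofList_eq_foldl _).symm
  have invB : pvInvB infected (PySem.Set.ofList infected.reverse) := by
    refine ⟨PySem.Set.nodup_ofList _, ?_, ?_, ?_⟩
    · exact fun c hc => (PySem.Set.mem_ofList _ _).2 (List.mem_reverse.2 hc)
    · exact fun c hc => pvReach.base c (List.mem_reverse.1 ((PySem.Set.mem_ofList _ _).1 hc))
    · exact fun c hc => hB c (List.mem_reverse.1 ((PySem.Set.mem_ofList _ _).1 hc))
  have hBres := pv_loopB infected (pvFuelN + 1) (PySem.Set.ofList infected.reverse) invB (by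
      have := Nat.sub_le pvFuelN (PySem.Set.ofList infected.reverse).length
      omega)
  have hperm : List.Perm
      (pvLoopA (infected.length + pvFuelN + 1) infected (PySem.Set.ofList infected))
      (pvLoopB (pvFuelN + 1) (PySem.Set.ofList infected.reverse)) :=
    (List.perm_ext_iff_of_nodup hA.1 hBres.1).2 (fun a => (hA.2 a).trans ((hBres.2 a).symm))
  show ((pvLoopA (infected.length + pvFuelN + 1) infected (PySem.Set.ofList infected)).length : Int)
      = ((pvLoopB (pvFuelN + 1) (infected.reverse.foldl PySem.Set.add PySem.Set.empty)).length : Int)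
  rw [hcells]
  exact congrArg Nat.cast hperm.length_eq
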